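-- pv_equiv track=rewrite | github.com/diegoorellanaga/CodeFights | code1.py | is_zigzag
-- ===== SOURCE A (Python) =====
-- def is_zigzag(arr):
--     is_zigzag=True
--     i=1
--     for k in range(len(arr)-2):
--         if not (((arr[i+1] > arr[i]) and (arr[i] < arr[i-1]) ) or  ((arr[i+1] < arr[i]) and (arr[i] > arr[i-1]) )):
--             is_zigzag=False
--         i=i+1
--     if len(arr)>1:
--         if arr[0]==arr[1]:
--             is_zigzag=False
--     return (is_zigzag, len(arr))
-- ===== SOURCE B (Python) =====
-- def is_zigzag(arr):
--     d = [(y > x) - (y < x) for x, y in zip(arr, arr[1:])]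
--     z = all(u * v == -1 for u, v in zip(d, d[1:]))
--     if d and d[0] == 0:
--         z = False
--     return (z, len(arr))
-- ===== Notes on version B (the rewrite author's own statement) =====
-- stated objective: alternative
-- what changed: B replaces A's index-walking triple-window loop with two comprehension passes: it first builds a direction array of comparison signs for adjacent pairs, then checks every adjacent pair of directions multiplies to -1, with the lone length-2 equal-pair case read off the direction array itself.
import Mathlib
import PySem

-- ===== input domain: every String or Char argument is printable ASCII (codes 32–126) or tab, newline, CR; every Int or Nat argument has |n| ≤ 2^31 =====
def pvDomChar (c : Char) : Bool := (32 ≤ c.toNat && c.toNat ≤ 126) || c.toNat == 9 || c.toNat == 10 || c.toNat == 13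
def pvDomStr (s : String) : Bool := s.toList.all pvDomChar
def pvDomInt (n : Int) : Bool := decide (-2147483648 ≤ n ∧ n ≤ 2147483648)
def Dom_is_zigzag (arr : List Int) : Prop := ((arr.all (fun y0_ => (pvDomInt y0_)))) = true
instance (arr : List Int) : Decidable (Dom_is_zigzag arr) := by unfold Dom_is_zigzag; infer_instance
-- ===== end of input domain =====

-- B re-implements A's index-walking triple-window loop as two comprehension passes over
-- adjacent pairs (a direction array, then a product check); alternative decomposition, same cost.

-- ===== PORT A =====
-- loop body of A's `for k in range(len(arr)-2)`: state (is_zigzag, i), element ignored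
def pvStepA (arr : List Int) (st : Bool × Int) (_k : Int) : Bool × Int :=
  let i := st.2
  ((if ¬ ((PySem.List.pyGetD arr (i+1) 0 > PySem.List.pyGetD arr i 0 ∧
           PySem.List.pyGetD arr i 0 < PySem.List.pyGetD arr (i-1) 0) ∨
          (PySem.List.pyGetD arr (i+1) 0 < PySem.List.pyGetD arr i 0 ∧
           PySem.List.pyGetD arr i 0 > PySem.List.pyGetD arr (i-1) 0))
    then false else st.1), i + 1)

def is_zigzag (arr : List Int) : Bool × Int :=
  let n : Int := arr.length
  let st := (PySem.List.pyRange 0 (n - 2) 1).foldl (pvStepA arr) (true, 1)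
  let z := if n > 1 then
             (if PySem.List.pyGetD arr 0 0 = PySem.List.pyGetD arr 1 0 then false else st.1)
           else st.1
  (z, n)

-- ===== PORT B =====
-- (y > x) - (y < x), Python booleans as ints
def pvDir (x y : Int) : Int := (if y > x then 1 else 0) - (if y < x then 1 else 0)

def is_zigzag_alt (arr : List Int) : Bool × Int :=
  let d := List.zipWith pvDir arr (PySem.List.slice arr (some 1) none)
  let z := (List.zipWith (fun u v => decide (u * v = -1)) d (PySem.List.slice d (some 1) none)).all id
  let z := match d with
           | d0 :: _ => if d0 = 0 then false else z
           | [] => z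
  (z, (arr.length : Int))

-- ===== PRECONDITION & SPEC =====
def Spec_is_zigzag (arr : List Int) (out : Bool × Int) : Prop := out = is_zigzag_alt arr
instance (arr : List Int) (out : Bool × Int) : Decidable (Spec_is_zigzag arr out) := by unfold Spec_is_zigzag; infer_instance

-- ===== CLAIM (what is proved, stated in full; the proofs are below) =====
def Claim_equal_is_zigzag : Prop := ∀ (arr : List Int), Dom_is_zigzag arr → Spec_is_zigzag arr (is_zigzag arr)

-- ===== LEMMAS AND PROOFS =====

-- the condition A's loop tests at index i
abbrev pvCondA (arr : List Int) (i : Int) : Prop :=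
  (PySem.List.pyGetD arr (i+1) 0 > PySem.List.pyGetD arr i 0 ∧
   PySem.List.pyGetD arr i 0 < PySem.List.pyGetD arr (i-1) 0) ∨
  (PySem.List.pyGetD arr (i+1) 0 < PySem.List.pyGetD arr i 0 ∧
   PySem.List.pyGetD arr i 0 > PySem.List.pyGetD arr (i-1) 0)

theorem pvIfNot {C : Prop} [Decidable C] (b : Bool) :
    (if ¬ C then false else b) = (b && decide C) := by
  by_cases h : C <;> simp [h]

theorem pvStepA_eq (arr : List Int) (st : Bool × Int) (k : Int) :
    pvStepA arr st k = ((st.1 && decide (pvCondA arr st.2)), st.2 + 1) := by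
  dsimp only [pvStepA]
  rw [pvIfNot]

theorem pvLoopA (arr : List Int) (l : List Int) (z0 : Bool) (i0 : Int) :
    l.foldl (pvStepA arr) (z0, i0) =
      ((z0 && decide (∀ k < l.length, pvCondA arr (i0 + (k : Int)))), i0 + l.length) := by
  induction l generalizing z0 i0 with
  | nil => simp
  | cons a l ih =>
    rw [List.foldl_cons, pvStepA_eq, ih]
    simp only [List.length_cons, Prod.mk.injEq]
    refine ⟨?_, by push_cast; ring⟩
    by_cases h : pvCondA arr i0
    · simp only [h, decide_true, Bool.and_true]
      congr 1
      rw [decide_eq_decide]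
      constructor
      · intro hall k hk
        rcases Nat.eq_zero_or_pos k with rfl | hk0
        · simpa using h
        · have := hall (k - 1) (by omega)
          have hc : i0 + 1 + ((k - 1 : Nat) : Int) = i0 + (k : Int) := by
            push_cast [Nat.cast_sub hk0]; ring
          rwa [hc] at this
      · intro hall k hk
        have := hall (k + 1) (by omega)
        have hc : i0 + ((k + 1 : Nat) : Int) = i0 + 1 + (k : Int) := by push_cast; ring
        rwa [hc] at this
    · have h0 : ¬ (∀ k < l.length + 1, pvCondA arr (i0 + (k : Int))) :=
        fun hall => h (by simpa using hall 0 (by omega))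
      simp only [h, decide_false, Bool.and_false, Bool.false_and]
      symm
      rw [Bool.and_eq_false_iff]
      right
      exact decide_eq_false h0

theorem pvAllZip (g : Int → Int → Bool) (l : List Int) :
    (List.zipWith g l l.tail).all id =
      decide (∀ j < l.length - 1, g (l.getD j 0) (l.getD (j+1) 0) = true) := by
  induction l with
  | nil => simp
  | cons a l ih =>
    cases l with
    | nil => simp
    | cons b t =>
      rw [show (b :: t).tail = t from rfl] at ih
      rw [show (a :: b :: t).tail = b :: t from rfl, List.zipWith_cons_cons, List.all_cons, ih]
      by_cases hab : g a b = true
      · simp only [hab, id, Bool.true_and]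
        rw [decide_eq_decide]
        simp only [List.length_cons]
        constructor
        · intro hall j hj
          rcases Nat.eq_zero_or_pos j with rfl | hj0
          · simpa using hab
          · have := hall (j - 1) (by omega)
            have h1 : j - 1 + 1 = j := by omega
            rw [h1] at this
            rcases Nat.exists_eq_add_of_lt hj0 with ⟨j', rfl⟩
            simpa using this
        · intro hall j hj
          have := hall (j + 1) (by omega)
          simpa using this
      · simp only [hab, id, Bool.false_and]
        symm
        simp only [decide_eq_false_iff_not, not_forall]
        refine ⟨0, by simp, by simpa using hab⟩

theorem pvTriple (x y z : Int) :
    (pvDir x y * pvDir y z = -1) ↔ ((z > y ∧ y < x) ∨ (z < y ∧ y > x)) := by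
  unfold pvDir
  split_ifs <;> norm_num <;> omega

theorem pvDir_eq_zero (x y : Int) : pvDir x y = 0 ↔ x = y := by
  unfold pvDir; split_ifs <;> omega

theorem pvD_getD (arr : List Int) (k : Nat) (hk : k + 1 < arr.length) :
    (List.zipWith pvDir arr arr.tail).getD k 0 = pvDir (arr.getD k 0) (arr.getD (k+1) 0) := by
  have hlen : (List.zipWith pvDir arr arr.tail).length = arr.length - 1 := by
    rw [List.length_zipWith, List.length_tail]; omega
  have hk' : k < (List.zipWith pvDir arr arr.tail).length := by omega
  rw [List.getD_eq_getElem _ _ hk', List.getElem_zipWith, List.getElem_tail,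
      List.getD_eq_getElem _ _ (by omega), List.getD_eq_getElem _ _ (by omega)]

theorem pvPoint (arr : List Int) (k : Nat) (hk : k + 3 ≤ arr.length) :
    pvCondA arr (1 + (k : Int)) ↔
      ((List.zipWith pvDir arr arr.tail).getD k 0 *
        (List.zipWith pvDir arr arr.tail).getD (k+1) 0 = -1) := by
  rw [pvD_getD arr k (by omega), pvD_getD arr (k+1) (by omega), pvTriple]
  unfold pvCondA
  rw [show (1 + (k:Int) + 1) = ((k+2 : Nat) : Int) by push_cast; ring,
      show (1 + (k:Int) - 1) = ((k : Nat) : Int) by ring,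
      show (1 + (k:Int)) = ((k+1 : Nat) : Int) by push_cast; ring]
  simp only [PySem.List.pyGetD_natCast]

theorem is_zigzag_spec : Claim_equal_is_zigzag := by
  intro arr _
  unfold Spec_is_zigzag
  match arr with
  | [] => decide
  | [a] =>
    show is_zigzag [a] = is_zigzag_alt [a]
    dsimp only [is_zigzag, is_zigzag_alt]
    norm_num [PySem.List.pyRange, PySem.List.slice_from_one]
  | a :: b :: t =>
    show is_zigzag (a :: b :: t) = is_zigzag_alt (a :: b :: t)
    have hlen : (((a :: b :: t).length : Nat) : Int) - 2 = (t.length : Int) := by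
      push_cast [List.length_cons]; ring
    dsimp only [is_zigzag, is_zigzag_alt]
    rw [hlen, PySem.List.pyRange_zero_natCast, pvLoopA]
    simp only [PySem.List.slice_from_one, show (a :: b :: t).tail = b :: t from rfl,
      List.zipWith_cons_cons]
    rw [if_pos (show (((a :: b :: t).length : Nat) : Int) > 1 by push_cast [List.length_cons]; omega)]
    rw [PySem.List.pyGetD_zero_cons,
      show PySem.List.pyGetD (a :: b :: t) 1 0 = b from by
        rw [show (1:Int) = ((1:Nat):Int) from rfl, PySem.List.pyGetD_natCast]; rfl]
    by_cases hab : a = b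
    · rw [if_pos hab, if_pos ((pvDir_eq_zero a b).mpr hab)]
    · rw [if_neg hab, if_neg (fun h => hab ((pvDir_eq_zero a b).mp h))]
      rw [Bool.true_and, pvAllZip]
      simp only [List.length_map, List.length_range]
      rw [show (pvDir a b :: List.zipWith pvDir (b :: t) t).length - 1 = t.length from by
            simp only [List.length_cons, List.length_zipWith]; omega]
      refine Prod.ext ?_ rfl
      rw [decide_eq_decide]
      constructor
      · intro hall j hj
        simp only [decide_eq_true_eq]
        exact (pvPoint (a :: b :: t) j (by simp only [List.length_cons]; omega)).mp (hall j hj)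
      · intro hall k hk
        have h1 := hall k hk
        simp only [decide_eq_true_eq] at h1
        exact (pvPoint (a :: b :: t) k (by simp only [List.length_cons]; omega)).mpr h1
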